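-- pv_equiv track=rewrite | github.com/pmavr/Sport_Analytics | playground/hough_line_demo.py | cluster_by_distance
-- ===== SOURCE A (Python) =====
-- def cluster_by_distance(lines, max_distance):
--
--     clusters = [[lines[0]]]
--     for line in lines[1:]:
--         _, _, _, cur_intercept = line
--         _, _, _, prev_intercept = clusters[-1][-1]
--         if abs(cur_intercept - prev_intercept) <= max_distance:
--             clusters[-1].append(line)
--         else:
--             clusters.append([line])
--     return clusters
-- ===== SOURCE B (Python) =====
-- def cluster_by_distance(lines, max_distance):
--     if not lines:
--         raise IndexError('list index out of range')
--     intercepts = [line[3] for line in lines]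
--     splits = [i for i in range(1, len(lines))
--               if abs(intercepts[i] - intercepts[i - 1]) > max_distance]
--     bounds = [0] + splits + [len(lines)]
--     return [lines[a:b] for a, b in zip(bounds, bounds[1:])]
-- ===== Notes on version B (the rewrite author's own statement) =====
-- stated objective: alternative
-- what changed: B replaces A's single fold that grows the last cluster in place by a two-phase pipeline: first compute the list of split indices from adjacent intercept differences, then cut the input list at those boundaries with slices.
import Mathlib
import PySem

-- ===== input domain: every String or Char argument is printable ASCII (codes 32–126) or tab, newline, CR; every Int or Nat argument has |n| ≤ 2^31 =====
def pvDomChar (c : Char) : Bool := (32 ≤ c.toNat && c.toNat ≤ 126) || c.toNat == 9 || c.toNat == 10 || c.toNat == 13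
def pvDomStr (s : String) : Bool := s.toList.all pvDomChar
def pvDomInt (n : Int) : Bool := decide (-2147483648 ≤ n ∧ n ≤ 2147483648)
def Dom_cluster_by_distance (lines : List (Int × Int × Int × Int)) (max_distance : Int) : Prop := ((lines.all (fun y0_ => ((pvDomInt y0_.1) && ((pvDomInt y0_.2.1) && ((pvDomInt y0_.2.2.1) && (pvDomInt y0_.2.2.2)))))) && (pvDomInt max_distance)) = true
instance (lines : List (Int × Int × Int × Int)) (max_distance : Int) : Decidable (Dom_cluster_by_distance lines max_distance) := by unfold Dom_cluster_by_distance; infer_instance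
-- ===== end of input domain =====

-- B re-implements A's fold (grow the last cluster in place) as a two-phase pipeline:
-- compute split indices from adjacent intercept differences, then slice at the boundaries.
-- Both raise IndexError on the empty list; Pre_ excludes it.

-- ===== PORT A =====
def cluster_by_distance (lines : List (Int × Int × Int × Int)) (max_distance : Int) : List (List (Int × Int × Int × Int)) :=
  match lines with
  | [] => []   -- Python raises IndexError on lines[0]; excluded by Pre_
  | l0 :: _ =>
    (PySem.List.slice lines (some 1) none).foldl
      (fun clusters line =>
        let prev := PySem.List.pyGetD (PySem.List.pyGetD clusters (-1) []) (-1) (0, 0, 0, 0)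
        if |line.2.2.2 - prev.2.2.2| ≤ max_distance then
          clusters.dropLast ++ [PySem.List.pyGetD clusters (-1) [] ++ [line]]
        else
          clusters ++ [[line]])
      [[l0]]

-- ===== PORT B =====
def cluster_by_distance_alt (lines : List (Int × Int × Int × Int)) (max_distance : Int) : List (List (Int × Int × Int × Int)) :=
  match lines with
  | [] => []   -- Source B raises IndexError here; excluded by Pre_
  | _ :: _ =>
    let intercepts := lines.map (fun line => line.2.2.2)
    let splits := (PySem.List.pyRange 1 (lines.length : Int) 1).filter
        (fun i => decide (max_distance <
          |PySem.List.pyGetD intercepts i 0 - PySem.List.pyGetD intercepts (i - 1) 0|))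
    let bounds := 0 :: (splits ++ [(lines.length : Int)])
    (bounds.zip bounds.tail).map (fun ab => PySem.List.slice lines (some ab.1) (some ab.2))

-- ===== PRECONDITION & SPEC =====
-- Both Pythons raise IndexError on the empty list; Pre_ excludes exactly that input.
def Pre_cluster_by_distance (lines : List (Int × Int × Int × Int)) (max_distance : Int) : Prop := lines ≠ []
instance (lines : List (Int × Int × Int × Int)) (max_distance : Int) : Decidable (Pre_cluster_by_distance lines max_distance) := by unfold Pre_cluster_by_distance; infer_instance
def pvWitness_cluster_by_distance : (List (Int × Int × Int × Int)) × Int := ([(0, 0, 0, 1), (0, 0, 0, 2), (0, 0, 0, 9)], 3)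

def Spec_cluster_by_distance (lines : List (Int × Int × Int × Int)) (max_distance : Int) (out : List (List (Int × Int × Int × Int))) : Prop := out = cluster_by_distance_alt lines max_distance
instance (lines : List (Int × Int × Int × Int)) (max_distance : Int) (out : List (List (Int × Int × Int × Int))) : Decidable (Spec_cluster_by_distance lines max_distance out) := by unfold Spec_cluster_by_distance; infer_instance

-- ===== CLAIM (what is proved, stated in full; the proofs are below) =====
def Claim_equal_cluster_by_distance : Prop := ∀ (lines : List (Int × Int × Int × Int)) (max_distance : Int), Dom_cluster_by_distance lines max_distance → Pre_cluster_by_distance lines max_distance → Spec_cluster_by_distance lines max_distance (cluster_by_distance lines max_distance)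

-- ===== LEMMAS AND PROOFS =====

-- canonical recursive grouping: (first cluster, remaining clusters) of (x :: rest)
def pvGrp (md : Int) : (Int × Int × Int × Int) → List (Int × Int × Int × Int) →
    List (Int × Int × Int × Int) × List (List (Int × Int × Int × Int))
  | x, [] => ([x], [])
  | x, y :: ys =>
    let r := pvGrp md y ys
    if |y.2.2.2 - x.2.2.2| ≤ md then (x :: r.1, r.2) else ([x], r.1 :: r.2)

-- 0-based gap positions of (x :: rest): k such that |itc rest[k] - itc of its predecessor| > md
def pvGaps (md : Int) : (Int × Int × Int × Int) → List (Int × Int × Int × Int) → List Nat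
  | _, [] => []
  | x, y :: ys =>
    (if md < |y.2.2.2 - x.2.2.2| then [0] else []) ++ (pvGaps md y ys).map Nat.succ

def pvChunks (l : List (Int × Int × Int × Int)) (n : Nat) :
    Nat → List Nat → List (List (Int × Int × Int × Int))
  | a, [] => [(l.drop a).take (n - a)]
  | a, s :: ss => (l.drop a).take (s - a) :: pvChunks l n s ss

-- Nat.succ mapped is (+1) mapped
theorem pvMapSucc (g : List Nat) : g.map Nat.succ = g.map (· + 1) := by
  simp

-- chunk boundaries shift under cons
theorem pvChunks_shift (x : Int × Int × Int × Int) (l : List (Int × Int × Int × Int)) (n : Nat) :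
    ∀ (ss : List Nat) (a : Nat),
      pvChunks (x :: l) (n + 1) (a + 1) (ss.map (· + 1)) = pvChunks l n a ss := by
  intro ss
  induction ss with
  | nil => intro a; simp [pvChunks]
  | cons s tl ih => intro a; simp [pvChunks, ih]

theorem pvChunks_cons_zero (x : Int × Int × Int × Int) (l : List (Int × Int × Int × Int)) (n : Nat)
    (ss : List Nat) :
    pvChunks (x :: l) (n + 1) 0 (ss.map (· + 1)) =
      (x :: (pvChunks l n 0 ss).headD []) :: (pvChunks l n 0 ss).tail := by
  cases ss with
  | nil => simp [pvChunks]
  | cons s tl => simp [pvChunks, pvChunks_shift]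

-- slicing at the gap boundaries is the recursive grouping
theorem pvChunks_grp (md : Int) :
    ∀ (rest : List (Int × Int × Int × Int)) (x : Int × Int × Int × Int),
      pvChunks (x :: rest) (rest.length + 1) 0 ((pvGaps md x rest).map (· + 1)) =
        (pvGrp md x rest).1 :: (pvGrp md x rest).2 := by
  intro rest
  induction rest with
  | nil => intro x; simp [pvGaps, pvGrp, pvChunks]
  | cons y ys ih =>
    intro x
    simp only [pvGaps, pvGrp, List.length_cons]
    by_cases h : |y.2.2.2 - x.2.2.2| ≤ md
    · rw [if_neg (not_lt.mpr h), if_pos h]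
      simp only [List.nil_append, pvMapSucc]
      rw [pvChunks_cons_zero x (y :: ys) (ys.length + 1) ((pvGaps md y ys).map (· + 1))]
      rw [ih y]
      simp
    · rw [if_pos (not_le.mp h), if_neg h]
      simp only [List.singleton_append, List.map_cons, pvMapSucc]
      have hs := pvChunks_shift x (y :: ys) (ys.length + 1) ((pvGaps md y ys).map (· + 1)) 0
      simp only [pvChunks, Nat.zero_add]
      rw [hs, ih y]
      simp

-- the filtered index range is pvGaps
theorem pvFilter_gaps (md : Int) :
    ∀ (rest : List (Int × Int × Int × Int)) (x : Int × Int × Int × Int),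
      (List.range rest.length).filter (fun k => decide (md <
          |((x :: rest).map (fun line => line.2.2.2)).getD (k + 1) 0
            - ((x :: rest).map (fun line => line.2.2.2)).getD k 0|)) = pvGaps md x rest := by
  intro rest
  induction rest with
  | nil => intro x; simp [pvGaps]
  | cons y ys ih =>
    intro x
    simp only [List.length_cons]
    rw [List.range_succ_eq_map, List.filter_cons, List.filter_map]
    rw [show ((fun k => decide (md <
        |((x :: y :: ys).map (fun line => line.2.2.2)).getD (k + 1) 0
          - ((x :: y :: ys).map (fun line => line.2.2.2)).getD k 0|)) ∘ Nat.succ)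
        = (fun k => decide (md <
        |((y :: ys).map (fun line => line.2.2.2)).getD (k + 1) 0
          - ((y :: ys).map (fun line => line.2.2.2)).getD k 0|)) from by
      funext k; simp]
    rw [ih y]
    by_cases h : md < |y.2.2.2 - x.2.2.2|
    · simp [pvGaps, h]
    · simp [pvGaps, h]

-- zip of consecutive boundary pairs, mapped to drop/take, is pvChunks
theorem pvZip_chunks (l : List (Int × Int × Int × Int)) (n : Nat) :
    ∀ (ss : List Nat) (a : Nat),
      (((a :: (ss ++ [n])).zip (ss ++ [n])).map
        (fun ab => (l.drop ab.1).take (ab.2 - ab.1))) = pvChunks l n a ss := by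
  intro ss
  induction ss with
  | nil => intro a; simp [pvChunks]
  | cons s tl ih =>
    intro a
    simp only [List.cons_append, List.zip_cons_cons, List.map_cons, pvChunks]
    rw [← ih s]

-- A's fold invariant
theorem pvFoldA (md : Int) :
    ∀ (rest : List (Int × Int × Int × Int)) (cs : List (List (Int × Int × Int × Int)))
      (d : List (Int × Int × Int × Int)) (p : Int × Int × Int × Int),
      rest.foldl
        (fun clusters line =>
          if |line.2.2.2 - (PySem.List.pyGetD (PySem.List.pyGetD clusters (-1) []) (-1)
              (0, 0, 0, 0)).2.2.2| ≤ md then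
            clusters.dropLast ++ [PySem.List.pyGetD clusters (-1) [] ++ [line]]
          else
            clusters ++ [[line]])
        (cs ++ [d ++ [p]]) =
      cs ++ ((d ++ (pvGrp md p rest).1) :: (pvGrp md p rest).2) := by
  intro rest
  induction rest with
  | nil => intro cs d p; simp [pvGrp]
  | cons y ys ih =>
    intro cs d p
    rw [List.foldl_cons]
    have hlast : PySem.List.pyGetD (cs ++ [d ++ [p]]) (-1) ([] : List (Int × Int × Int × Int))
        = d ++ [p] := PySem.List.pyGetD_neg_one_append_singleton ..
    have hprev : PySem.List.pyGetD (d ++ [p]) (-1) ((0,0,0,0) : Int × Int × Int × Int) = p :=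
      PySem.List.pyGetD_neg_one_append_singleton ..
    simp only [hlast, hprev]
    by_cases h : |y.2.2.2 - p.2.2.2| ≤ md
    · simp only [if_pos h, List.dropLast_concat]
      rw [ih cs (d ++ [p]) y]
      simp [pvGrp, h]
    · simp only [if_neg h]
      have h2 := ih (cs ++ [d ++ [p]]) [] y
      simp only [List.nil_append] at h2
      rw [h2]
      simp [pvGrp, h]

-- characterizations of the two ports on a nonempty list
theorem pvA_char (md : Int) (x : Int × Int × Int × Int) (rest : List (Int × Int × Int × Int)) :
    cluster_by_distance (x :: rest) md = (pvGrp md x rest).1 :: (pvGrp md x rest).2 := by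
  show (PySem.List.slice (x :: rest) (some 1) none).foldl _ [[x]] = _
  rw [PySem.List.slice_from_one]
  have := pvFoldA md rest [] [] x
  simpa using this

theorem pvB_char (md : Int) (x : Int × Int × Int × Int) (rest : List (Int × Int × Int × Int)) :
    cluster_by_distance_alt (x :: rest) md =
      pvChunks (x :: rest) (rest.length + 1) 0 ((pvGaps md x rest).map (· + 1)) := by
  simp only [cluster_by_distance_alt, List.length_cons]
  rw [PySem.List.pyRange_one]
  rw [show (((rest.length + 1 : Nat) : Int) - 1).toNat = rest.length from by simp]
  rw [List.filter_map]
  rw [show ((fun i => decide (md <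
        |PySem.List.pyGetD ((x :: rest).map (fun line => line.2.2.2)) i 0
          - PySem.List.pyGetD ((x :: rest).map (fun line => line.2.2.2)) (i - 1) 0|))
        ∘ (fun k : Nat => 1 + (k : Int)))
      = (fun k : Nat => decide (md <
        |((x :: rest).map (fun line => line.2.2.2)).getD (k + 1) 0
          - ((x :: rest).map (fun line => line.2.2.2)).getD k 0|)) from by
    funext k
    have h1 : (1 : Int) + (k : Int) = ((k + 1 : Nat) : Int) := by push_cast; ring
    have h2 : (1 : Int) + (k : Int) - 1 = ((k : Nat) : Int) := by ring
    simp only [Function.comp]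
    rw [h2]
    simp only [h1, PySem.List.pyGetD_natCast]]
  rw [pvFilter_gaps]
  rw [show (pvGaps md x rest).map (fun k : Nat => 1 + (k : Int))
      = ((pvGaps md x rest).map (· + 1)).map (fun n : Nat => (n : Int)) from by
    rw [List.map_map]; congr 1; funext k; simp only [Function.comp_apply]; push_cast; ring]
  rw [show (0 : Int) :: (((pvGaps md x rest).map (· + 1)).map (fun n : Nat => (n : Int))
        ++ [((rest.length + 1 : Nat) : Int)])
      = ((0 :: ((pvGaps md x rest).map (· + 1) ++ [rest.length + 1])).map
          (fun n : Nat => (n : Int))) from by simp]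
  rw [show ((0 :: ((pvGaps md x rest).map (· + 1) ++ [rest.length + 1])).map
        (fun n : Nat => (n : Int))).tail
      = ((pvGaps md x rest).map (· + 1) ++ [rest.length + 1]).map
          (fun n : Nat => (n : Int)) from by simp]
  rw [List.zip_map, List.map_map]
  rw [show ((fun ab => PySem.List.slice (x :: rest) (some ab.1) (some ab.2))
        ∘ Prod.map (fun n : Nat => (n : Int)) (fun n : Nat => (n : Int)))
      = (fun ab : Nat × Nat => ((x :: rest).drop ab.1).take (ab.2 - ab.1)) from by
    funext ab
    simp [Function.comp, PySem.List.slice_natCast]]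
  rw [pvZip_chunks]

-- ===== VERDICT (by name: the statement is the Claim_ definition above) =====
theorem cluster_by_distance_spec : Claim_equal_cluster_by_distance := by
  intro lines md hdom hpre
  unfold Spec_cluster_by_distance
  cases lines with
  | nil => exact absurd rfl hpre
  | cons x rest =>
    rw [pvA_char, pvB_char]
    exact (pvChunks_grp md rest x).symm
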